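-- pv_equiv track=rewrite | github.com/oceancjc/DSP_Lib | dataprocessing.py | data_split_4channels
-- ===== SOURCE A (Python) =====
-- def data_split_4channels(data_in):
--     ch1i = []
--     ch1q = []
--     ch2i = []
--     ch2q = []
--     for i in range(len(data_in)):
--         if i%4 == 0:
--             ch1i.append(data_in[i])
--         elif i%4 == 1:
--             ch1q.append(data_in[i])
--         elif i%4 == 2:
--             ch2i.append(data_in[i])
--         else:
--             ch2q.append(data_in[i])
--     return ch1i,ch1q,ch2i,ch2q
-- ===== SOURCE B (Python) =====
-- def data_split_4channels(data_in):
--     # Rotation-based deinterleave: walk the data back-to-front, rotating the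
--     # four channel lists one slot per element, so no index / mod arithmetic
--     # is ever needed; each channel is reversed once at the end.
--     a, b, c, d = [], [], [], []
--     for x in reversed(data_in):
--         a, b, c, d = d, a, b, c
--         a.append(x)
--     return list(reversed(a)), list(reversed(b)), list(reversed(c)), list(reversed(d))
-- ===== Notes on version B (the rewrite author's own statement) =====
-- stated objective: alternative
-- what changed: Replaces the index loop with an i%4 branch dispatch by a back-to-front pass that rotates the four channel lists one slot per element (no index or mod arithmetic), reversing each channel once at the end.
import Mathlib
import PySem

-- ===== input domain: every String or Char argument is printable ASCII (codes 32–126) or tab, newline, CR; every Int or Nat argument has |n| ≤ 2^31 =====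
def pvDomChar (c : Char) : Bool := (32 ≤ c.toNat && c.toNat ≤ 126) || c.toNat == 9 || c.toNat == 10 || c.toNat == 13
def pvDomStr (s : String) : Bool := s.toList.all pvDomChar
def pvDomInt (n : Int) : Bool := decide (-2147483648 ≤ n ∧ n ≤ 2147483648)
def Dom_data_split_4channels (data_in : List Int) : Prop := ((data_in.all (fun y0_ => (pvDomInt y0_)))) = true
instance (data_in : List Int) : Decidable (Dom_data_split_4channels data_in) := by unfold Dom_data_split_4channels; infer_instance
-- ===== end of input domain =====

-- B replaces A's i%4 branch dispatch by a back-to-front rotation of the four channel lists (alternative decomposition, same cost).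

-- ===== PORT A =====
-- loop body of A's 'for i in range(len(data_in))'
def pvStepA (data_in : List Int)
    (st : List Int × List Int × List Int × List Int) (i : Int) :
    List Int × List Int × List Int × List Int :=
  match st with
  | (ch1i, ch1q, ch2i, ch2q) =>
    match PySem.List.pyGet? data_in i with
    | none => (ch1i, ch1q, ch2i, ch2q)   -- unreachable: i ∈ range(len(data_in))
    | some x =>
      if PySem.Int.mod i 4 == 0 then (ch1i ++ [x], ch1q, ch2i, ch2q)
      else if PySem.Int.mod i 4 == 1 then (ch1i, ch1q ++ [x], ch2i, ch2q)
      else if PySem.Int.mod i 4 == 2 then (ch1i, ch1q, ch2i ++ [x], ch2q)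
      else (ch1i, ch1q, ch2i, ch2q ++ [x])

def data_split_4channels (data_in : List Int) : List Int × List Int × List Int × List Int :=
  (PySem.List.pyRange 0 (data_in.length : Int) 1).foldl (pvStepA data_in) ([], [], [], [])

-- ===== PORT B =====
-- loop body of B's 'for x in reversed(data_in)': rotate the four channels, then append x to the front slot
def pvStepB (st : List Int × List Int × List Int × List Int) (x : Int) :
    List Int × List Int × List Int × List Int :=
  match st with
  | (a, b, c, d) => (d ++ [x], a, b, c)

def data_split_4channels_alt (data_in : List Int) : List Int × List Int × List Int × List Int :=
  match data_in.reverse.foldl pvStepB ([], [], [], []) with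
  | (a, b, c, d) => (a.reverse, b.reverse, c.reverse, d.reverse)

-- ===== PRECONDITION & SPEC =====
def Spec_data_split_4channels (data_in : List Int) (out : List Int × List Int × List Int × List Int) : Prop := out = data_split_4channels_alt data_in
instance (data_in : List Int) (out : List Int × List Int × List Int × List Int) : Decidable (Spec_data_split_4channels data_in out) := by unfold Spec_data_split_4channels; infer_instance

-- ===== CLAIM (what is proved, stated in full; the proofs are below) =====
def Claim_equal_data_split_4channels : Prop := ∀ (data_in : List Int), Dom_data_split_4channels data_in → Spec_data_split_4channels data_in (data_split_4channels data_in)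

-- ===== LEMMAS AND PROOFS =====

-- elements at positions r, r+4, r+8, … (for r < 4: positions ≡ r mod 4)
def pvPick : Nat → List Int → List Int
  | _, [] => []
  | 0, x :: xs => x :: pvPick 3 xs
  | r + 1, _ :: xs => pvPick r xs

theorem pvPick_append (y : Int) (ys : List Int) (r : Nat) (hr : r < 4) :
    pvPick r (ys ++ [y]) = pvPick r ys ++ (if ys.length % 4 = r then [y] else []) := by
  induction ys generalizing r with
  | nil =>
    interval_cases r <;> simp [pvPick]
  | cons z zs ih =>
    match r with
    | 0 =>
      have := ih 3 (by omega)
      simp only [List.cons_append, pvPick, this, List.length_cons]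
      by_cases h : zs.length % 4 = 3
      · simp [h, show (zs.length + 1) % 4 = 0 by omega]
      · simp [h, show ¬ (zs.length + 1) % 4 = 0 by omega]
    | r + 1 =>
      have := ih r (by omega)
      simp only [List.cons_append, pvPick, this, List.length_cons]
      by_cases h : zs.length % 4 = r
      · simp [h, show (zs.length + 1) % 4 = r + 1 by omega]
      · simp [h, show ¬ (zs.length + 1) % 4 = r + 1 by omega]

theorem pvB_foldr (l : List Int) :
    l.foldr (fun x st => pvStepB st x) ([], [], [], []) =
      ((pvPick 0 l).reverse, (pvPick 1 l).reverse, (pvPick 2 l).reverse, (pvPick 3 l).reverse) := by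
  induction l with
  | nil => simp [pvPick]
  | cons x xs ih => rw [List.foldr_cons, ih]; simp [pvStepB, pvPick]

theorem pvB_eq_pick (l : List Int) :
    data_split_4channels_alt l = (pvPick 0 l, pvPick 1 l, pvPick 2 l, pvPick 3 l) := by
  unfold data_split_4channels_alt
  rw [List.foldl_reverse, pvB_foldr]
  simp

theorem pvA_eq_pick (l : List Int) :
    data_split_4channels l = (pvPick 0 l, pvPick 1 l, pvPick 2 l, pvPick 3 l) := by
  induction l using List.reverseRecOn with
  | nil => simp [data_split_4channels, pvPick, PySem.List.pyRange]
  | append_singleton ys y ih =>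
    unfold data_split_4channels
    have hlen : (ys ++ [y]).length = ys.length + 1 := by simp
    rw [hlen]
    rw [show ((ys.length + 1 : Nat) : Int) = ((ys.length + 1 : Nat) : Int) from rfl]
    rw [PySem.List.pyRange_zero_natCast]
    rw [List.range_succ, List.map_append, List.foldl_append]
    -- prefix of the fold only reads indices < ys.length, so the extra [y] is invisible
    have hpref :
        (((List.range ys.length).map (fun k : Nat => (k : Int))).foldl (pvStepA (ys ++ [y])) ([], [], [], []))
          = (((List.range ys.length).map (fun k : Nat => (k : Int))).foldl (pvStepA ys) ([], [], [], [])) := by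
      apply PySem.List.foldl_congr_mem
      intro st i hi
      rcases List.mem_map.mp hi with ⟨j, hj, rfl⟩
      have hjlt : j < ys.length := List.mem_range.mp hj
      unfold pvStepA
      rw [show PySem.List.pyGet? (ys ++ [y]) ((j : Int)) = PySem.List.pyGet? ys ((j : Int)) by
        simp [PySem.List.pyGet?_natCast, List.getElem?_append_left hjlt]]
    have hA : data_split_4channels ys = (pvPick 0 ys, pvPick 1 ys, pvPick 2 ys, pvPick 3 ys) := ih
    unfold data_split_4channels at hA
    rw [PySem.List.pyRange_zero_natCast] at hA
    rw [hpref, hA]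
    -- final step at index ys.length
    simp only [List.map_cons, List.map_nil, List.foldl_cons, List.foldl_nil]
    unfold pvStepA
    rw [show PySem.List.pyGet? (ys ++ [y]) ((ys.length : Int)) = some y by
      simp]
    have hmod : PySem.Int.mod ((ys.length : Int)) 4 = ((ys.length % 4 : Nat) : Int) := by
      exact_mod_cast PySem.Int.mod_natCast ys.length 4
    rw [hmod]
    rw [pvPick_append y ys 0 (by omega), pvPick_append y ys 1 (by omega),
        pvPick_append y ys 2 (by omega), pvPick_append y ys 3 (by omega)]
    have h4 : ys.length % 4 < 4 := by omega
    interval_cases h : ys.length % 4 <;> simp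

-- ===== VERDICT (by name: the statement is the Claim_ definition above) =====
theorem data_split_4channels_spec : Claim_equal_data_split_4channels := by
  intro data_in _
  unfold Spec_data_split_4channels
  rw [pvA_eq_pick, pvB_eq_pick]
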